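-- pv_equiv track=rewrite | github.com/hubert-wojtowicz/faang | codeforces/445A-Boredom/455A.py | solution
-- ===== SOURCE A (Python) =====
-- from collections import Counter, defaultdict
--
-- def solution(A):
--     amax = max(A)
--     C = dict(Counter(A))
--     if len(C)==1:
--         return C[amax]*amax
--     F0 = 0
--     F1 = C[1] if (1 in C) else 0
--     F = 0
--     a = 2
--     while a <= amax:
--         ca = C[a] if a in C else 0
--         F = max(F1, F0 + ca*a)
--         F0 = F1
--         F1 = F
--         a += 1
--     return F
-- ===== SOURCE B (Python) =====
-- from collections import Counter
--
-- def solution(A):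
--     cnt = Counter(A)
--     if len(cnt) == 1:
--         return A[0] * len(A)
--     take = skip = 0
--     prev = None
--     for v in sorted(k for k in cnt if k > 0):
--         w = v * cnt[v]
--         best = max(take, skip)
--         if prev is not None and v == prev + 1:
--             take, skip = skip + w, best
--         else:
--             take, skip = best + w, best
--         prev = v
--     return max(take, skip)
-- ===== Notes on version B (the rewrite author's own statement) =====
-- stated objective: alternative
-- what changed: B runs the Boredom DP over the sorted distinct positive values only, collapsing each gap of 2 or more into a running max, instead of A's loop over every integer from 2 up to max(A).
-- intended difference: On lists that contain 1, have every element <= 1 and are not constant, A returns 0 because its DP loop starts at 2 and never copies F1 into F, while B returns the count of 1s, the intended maximal score from deleting all the 1s. — e.g. on solution([1, 0]): A returns 0, B returns 1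
import Mathlib
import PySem

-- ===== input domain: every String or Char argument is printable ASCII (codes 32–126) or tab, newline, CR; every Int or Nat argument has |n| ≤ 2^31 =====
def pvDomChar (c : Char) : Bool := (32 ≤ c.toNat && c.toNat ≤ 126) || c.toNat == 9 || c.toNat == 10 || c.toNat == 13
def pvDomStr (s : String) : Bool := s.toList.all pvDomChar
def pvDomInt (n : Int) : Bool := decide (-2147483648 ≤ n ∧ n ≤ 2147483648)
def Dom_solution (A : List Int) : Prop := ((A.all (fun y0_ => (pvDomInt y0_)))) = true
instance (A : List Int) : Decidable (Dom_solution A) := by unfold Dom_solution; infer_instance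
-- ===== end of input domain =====

-- B replaces A's DP loop over every integer 2..max(A) by a DP over the sorted distinct
-- positive values only, collapsing each gap of width ≥ 2 into a running maximum.

-- ===== PORT A =====
def solution (A : List Int) : Int :=
  match PySem.List.max? A (fun x => x) with
  | none => 0   -- unreachable under Pre_solution (max([]) raises ValueError)
  | some amax =>
    let C : PySem.Dict Int Int := PySem.Dict.counter A
    if C.size = 1 then C.getD amax 0 * amax
    else
      let st := (PySem.List.pyRange 2 (amax + 1) 1).foldl
        (fun (st : Int × Int × Int) a =>
          let ca := if C.contains a then C.getD a 0 else 0
          let F := max st.2.1 (st.1 + ca * a)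
          (st.2.1, F, F))
        (0, (if C.contains 1 then C.getD 1 0 else 0), 0)
      st.2.2

-- ===== PORT B =====
def solution_alt (A : List Int) : Int :=
  let cnt : PySem.Dict Int Int := PySem.Dict.counter A
  if cnt.size = 1 then PySem.List.pyGetD A 0 0 * (A.length : Int)
  else
    let vs := PySem.List.sorted (cnt.keys.filter (fun k => decide (0 < k))) (fun x => x) false
    let st := vs.foldl
      (fun (st : Int × Int × Option Int) v =>
        let w := v * cnt.getD v 0
        let best := max st.1 st.2.1
        match st.2.2 with
        | some p => if v = p + 1 then (st.2.1 + w, best, some v) else (best + w, best, some v)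
        | none => (best + w, best, some v))
      (0, 0, none)
    max st.1 st.2.1

-- ===== PRECONDITION & SPEC =====
-- Pre_ excludes only the empty list, on which A raises ValueError (max of empty sequence);
-- B returns 0 there.
def Pre_solution (A : List Int) : Prop := A ≠ []
instance (A : List Int) : Decidable (Pre_solution A) := by unfold Pre_solution; infer_instance
def pvWitness_solution : List Int := [1, 2, 3]

-- On lists that contain 1, have every element ≤ 1 and are not constant, A returns 0 because its
-- DP loop starts at 2 and never copies F1 into F, while B returns the count of 1s, the intended
-- maximal score from deleting all the 1s.
def D_solution (A : List Int) : Prop := (1 : Int) ∈ A ∧ (∀ x ∈ A, x ≤ 1) ∧ ∃ x ∈ A, x ≠ 1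
instance (A : List Int) : Decidable (D_solution A) := by unfold D_solution; infer_instance

def Spec_solution (A : List Int) (out : Int) : Prop := ¬ D_solution A → out = solution_alt A
instance (A : List Int) (out : Int) : Decidable (Spec_solution A out) := by unfold Spec_solution; infer_instance

def pvDiffWitness_solution : List Int := [1, 0]
def pvDiffWitnessOut_solution : Int × Int := (0, 1)

-- ===== CLAIM (what is proved, stated in full; the proofs are below) =====
def Claim_unchanged_solution : Prop := ∀ (A : List Int), Dom_solution A → Pre_solution A → Spec_solution A (solution A)
def Claim_changed_solution : Prop := Dom_solution (pvDiffWitness_solution) ∧ Pre_solution (pvDiffWitness_solution) ∧ D_solution (pvDiffWitness_solution) ∧ solution (pvDiffWitness_solution) = pvDiffWitnessOut_solution.1 ∧ solution_alt (pvDiffWitness_solution) = pvDiffWitnessOut_solution.2 ∧ pvDiffWitnessOut_solution.1 ≠ pvDiffWitnessOut_solution.2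
def Claim_exact_solution : Prop := ∀ (A : List Int), Dom_solution A → Pre_solution A → D_solution A → solution A ≠ solution_alt A

-- ===== LEMMAS AND PROOFS =====

def gcount (A : List Int) (v : Int) : Int := (A.count v : Int) * v

def dp (A : List Int) : Nat → Int × Int
  | 0 => (0, 0)
  | n + 1 => let p := dp A n; (p.2, max p.2 (p.1 + gcount A ((n + 1 : Nat) : Int)))

lemma gcount_nonneg (A : List Int) (v : Int) (hv : 0 ≤ v) : 0 ≤ gcount A v := by
  unfold gcount; positivity

lemma dp_le (A : List Int) (n : Nat) : (dp A n).1 ≤ (dp A n).2 := by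
  induction n with
  | zero => simp [dp]
  | succ n ih => simp only [dp]; exact le_max_left _ _

lemma dp_zero_prefix (A : List Int) (n : Nat)
    (h : ∀ r : Nat, 0 < r → r ≤ n → A.count ((r : Nat) : Int) = 0) : dp A n = (0, 0) := by
  induction n with
  | zero => rfl
  | succ n ih =>
    have hn := ih (fun r h1 h2 => h r h1 (by omega))
    simp only [dp, hn, gcount, h (n+1) (by omega) (by omega)]
    norm_num

lemma dp_gap (A : List Int) (p q : Nat) (hpq : p < q)
    (h : ∀ r : Nat, p < r → r ≤ q → A.count ((r : Nat) : Int) = 0) :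
    dp A q = ((dp A p).2, (dp A p).2) := by
  induction q with
  | zero => omega
  | succ q ih =>
    have hc : A.count ((q : Int) + 1) = 0 := by
      have := h (q+1) (by omega) (by omega); push_cast at this; exact this
    have hg : gcount A ((q : Int) + 1) = 0 := by simp [gcount, hc]
    rcases Nat.lt_or_ge p q with hlt | hge
    · have hq := ih hlt (fun r h1 h2 => h r h1 (by omega))
      simp only [dp, hq]
      push_cast
      simp [hg]
    · have : p = q := by omega
      subst this
      simp only [dp]
      push_cast
      simp [hg, max_eq_left (dp_le A p)]

def stepA (A : List Int) (st : Int × Int × Int) (a : Int) : Int × Int × Int :=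
  (st.2.1, max st.2.1 (st.1 + gcount A a), max st.2.1 (st.1 + gcount A a))

lemma caval (A : List Int) (a : Int) :
    (if (PySem.Dict.counter A).contains a then (PySem.Dict.counter A).getD a 0 else 0)
      = ((A.count a : Nat) : Int) := by
  by_cases h : (PySem.Dict.counter A).contains a = true
  · simp [h, PySem.Dict.getD_counter]
  · have hna : a ∉ A := by
      intro hm
      apply h
      rw [PySem.Dict.contains_counter]
      simp [hm]
    simp [h, List.count_eq_zero.mpr hna]

lemma count_zero_of_not_contains (A : List Int) (a : Int)
    (h : ¬ (PySem.Dict.counter A).contains a = true) : A.count a = 0 := by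
  rw [List.count_eq_zero]
  intro hm
  apply h
  rw [PySem.Dict.contains_counter]
  simp [hm]

lemma stepA_eq (A : List Int) :
    (fun (st : Int × Int × Int) a =>
      let ca := if (PySem.Dict.counter A).contains a then (PySem.Dict.counter A).getD a 0 else 0
      let F := max st.2.1 (st.1 + ca * a)
      (st.2.1, F, F)) = stepA A := by
  funext st a
  by_cases h : (PySem.Dict.counter A).contains a = true
  · simp [stepA, gcount, h]
  · simp [stepA, gcount, h, count_zero_of_not_contains A a h]

def stepB (A : List Int) (st : Int × Int × Option Int) (v : Int) : Int × Int × Option Int :=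
  match st.2.2 with
  | some p => if v = p + 1 then (st.2.1 + gcount A v, max st.1 st.2.1, some v)
              else (max st.1 st.2.1 + gcount A v, max st.1 st.2.1, some v)
  | none => (max st.1 st.2.1 + gcount A v, max st.1 st.2.1, some v)

lemma stepB_eq (A : List Int) :
    (fun (st : Int × Int × Option Int) v =>
        let w := v * (PySem.Dict.counter A).getD v 0
        let best := max st.1 st.2.1
        match st.2.2 with
        | some p => if v = p + 1 then (st.2.1 + w, best, some v) else (best + w, best, some v)
        | none => (best + w, best, some v)) = stepB A := by
  funext st v
  rcases st with ⟨t, s, pr⟩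
  cases pr <;> simp [stepB, PySem.Dict.getD_counter, gcount, mul_comm]

lemma dp_succ (A : List Int) (n : Nat) :
    dp A (n + 1) = ((dp A n).2, max (dp A n).2 ((dp A n).1 + gcount A ((n + 1 : Nat) : Int))) := rfl

lemma dp_one (A : List Int) : dp A 1 = (0, gcount A 1) := by
  rw [show (1 : Nat) = 0 + 1 from rfl, dp_succ]
  have : gcount A ((0 + 1 : Nat) : Int) = gcount A 1 := by norm_num
  simp [dp, max_eq_right (gcount_nonneg A 1 (by norm_num))]

lemma loopA (A : List Int) (m : Nat) (hm : 1 ≤ m) :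
    (PySem.List.pyRange 2 ((m : Int) + 1) 1).foldl (stepA A) (0, gcount A 1, 0)
      = ((dp A m).1, (dp A m).2, if 2 ≤ m then (dp A m).2 else 0) := by
  induction m with
  | zero => omega
  | succ m ih =>
    rcases Nat.lt_or_ge m 1 with h1 | h1
    · have hm0 : m = 0 := by omega
      subst hm0
      rw [show ((0 + 1 : Nat) : Int) + 1 = 2 by norm_num,
          PySem.List.pyRange_one_eq_nil (le_refl (2:Int))]
      simp [dp_one]
    · have hsplit : PySem.List.pyRange 2 ((↑(m + 1) : Int) + 1) 1
          = PySem.List.pyRange 2 ((m : Int) + 1) 1 ++ [(m : Int) + 1] := by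
        have := PySem.List.pyRange_one_succ_right (a := 2) (b := (m : Int) + 1) (by omega)
        push_cast
        push_cast at this
        exact this
      rw [hsplit, List.foldl_append, ih h1]
      simp only [List.foldl_cons, List.foldl_nil, stepA]
      have hcast : (m : Int) + 1 = ((m + 1 : Nat) : Int) := by push_cast; ring
      rw [hcast, dp_succ A m]
      simp [show 2 ≤ m + 1 by omega]
lemma loopB (A : List Int) (l : List Int) : ∀ (p t s : Int),
    0 < p → l.Pairwise (· < ·) → (∀ v ∈ l, p < v) →
    (∀ r : Int, p < r → r ∉ l → (∃ v ∈ l, r < v) → A.count r = 0) →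
    max t s = (dp A p.toNat).2 → s = (dp A p.toNat).1 →
    max (l.foldl (stepB A) (t, s, some p)).1 (l.foldl (stepB A) (t, s, some p)).2.1
      = (dp A (l.getLastD p).toNat).2 := by
  induction l with
  | nil =>
    intro p t s hp _ _ _ hmax hs
    simpa using hmax
  | cons v l ih =>
    intro p t s hp hpw hgt hcomp hmax hs
    have hpv : p < v := hgt v List.mem_cons_self
    have hvpos : 0 < v := lt_trans hp hpv
    have hvl : ∀ u ∈ l, v < u := (List.pairwise_cons.mp hpw).1
    have hgnn : 0 ≤ gcount A v := gcount_nonneg A v (le_of_lt hvpos)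
    have hcomp' : ∀ r : Int, v < r → r ∉ l → (∃ u ∈ l, r < u) → A.count r = 0 := by
      intro r hr hnl ⟨u, hu, hru⟩
      exact hcomp r (lt_trans hpv hr)
        (by
          intro hmem
          rcases List.mem_cons.mp hmem with h | h
          · omega
          · exact hnl h)
        ⟨u, List.mem_cons_of_mem v hu, hru⟩
    rw [List.foldl_cons, List.getLastD_cons]
    by_cases hadj : v = p + 1
    · -- adjacent value: take = skip + w
      have hdp : dp A v.toNat = ((dp A p.toNat).2, max (dp A p.toNat).2 ((dp A p.toNat).1 + gcount A v)) := by
        have hvt : v.toNat = p.toNat + 1 := by omega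
        have hcast : ((p.toNat + 1 : Nat) : Int) = v := by omega
        rw [hvt, dp_succ, hcast]
      have hstep : stepB A (t, s, some p) v = (s + gcount A v, max t s, some v) := by
        simp [stepB, hadj]
      rw [hstep]
      apply ih v (s + gcount A v) (max t s) hvpos (List.pairwise_cons.mp hpw).2 hvl hcomp'
      · rw [hdp, hmax, hs]
        exact max_comm _ _
      · rw [hdp, hmax]
    · -- gap ≥ 2: collapse to the running max
      have hgap2 : p + 1 < v := by omega
      have hz : ∀ r : Nat, p.toNat < r → r ≤ v.toNat - 1 → A.count ((r : Nat) : Int) = 0 := by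
        intro r h1 h2
        apply hcomp (r : Int) (by omega)
        · intro hmem
          rcases List.mem_cons.mp hmem with h | h
          · omega
          · have := hvl _ h; omega
        · exact ⟨v, List.mem_cons_self, by omega⟩
      have hgap := dp_gap A p.toNat (v.toNat - 1) (by omega) hz
      have hdp : dp A v.toNat = ((dp A p.toNat).2, (dp A p.toNat).2 + gcount A v) := by
        have hvt : v.toNat = (v.toNat - 1) + 1 := by omega
        have hcast : (((v.toNat - 1) + 1 : Nat) : Int) = v := by omega
        rw [hvt, dp_succ, hcast, hgap]
        simp [max_eq_right (by linarith : (dp A p.toNat).2 ≤ (dp A p.toNat).2 + gcount A v)]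
      have hstep : stepB A (t, s, some p) v = (max t s + gcount A v, max t s, some v) := by
        simp [stepB, hadj]
      rw [hstep]
      apply ih v (max t s + gcount A v) (max t s) hvpos (List.pairwise_cons.mp hpw).2 hvl hcomp'
      · rw [hdp, hmax]
        exact max_eq_left (by linarith)
      · rw [hdp, hmax]

lemma size_eq_keys_length {κ ν : Type} [BEq κ] (d : PySem.Dict κ ν) :
    d.size = d.keys.length := by
  simp [PySem.Dict.size, PySem.Dict.keys]

lemma nodup_all_eq {k : Int} (l : List Int) (hnd : l.Nodup) (h : ∀ x ∈ l, x = k) :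
    l = [] ∨ l = [k] := by
  cases l with
  | nil => exact Or.inl rfl
  | cons a t =>
    right
    have ha := h a List.mem_cons_self
    subst ha
    cases t with
    | nil => rfl
    | cons b t2 =>
      exfalso
      have hb : b = a := h b (by simp)
      have := (List.nodup_cons.mp hnd).1
      exact this (by simp [hb])

lemma getLastD_max (l : List Int) : ∀ (d x : Int), x ∈ l → (∀ y ∈ l, y ≤ x) →
    l.Pairwise (· < ·) → l.getLastD d = x := by
  induction l with
  | nil => intro d x hx _ _; simp at hx
  | cons a t ih =>
    intro d x hx hmax hpw
    rw [List.getLastD_cons]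
    cases t with
    | nil =>
      simp only [List.mem_cons, List.not_mem_nil, or_false] at hx
      subst hx; rfl
    | cons b t2 =>
      have hxt : x ∈ b :: t2 := by
        rcases List.mem_cons.mp hx with h | h
        · subst h
          have h1 := (List.pairwise_cons.mp hpw).1 b (by simp)
          have h2 := hmax b (by simp)
          omega
        · exact h
      exact ih a x hxt (fun y hy => hmax y (List.mem_cons_of_mem a hy))
        (List.pairwise_cons.mp hpw).2

lemma mem_posVals (A : List Int) (x : Int) :
    x ∈ PySem.List.sorted ((PySem.Dict.counter A).keys.filter (fun k => decide (0 < k))) (fun x => x) false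
      ↔ x ∈ A ∧ 0 < x := by
  rw [PySem.List.mem_sorted, List.mem_filter, PySem.Dict.keys_counter, PySem.Set.mem_ofList]
  simp

lemma pairwise_posVals (A : List Int) :
    (PySem.List.sorted ((PySem.Dict.counter A).keys.filter (fun k => decide (0 < k))) (fun x => x) false).Pairwise (· < ·) := by
  have h1 := PySem.List.sorted_pairwise ((PySem.Dict.counter A).keys.filter (fun k => decide (0 < k))) (fun x => x)
  have hnd : (PySem.List.sorted ((PySem.Dict.counter A).keys.filter (fun k => decide (0 < k))) (fun x => x) false).Nodup :=
    (PySem.List.sorted_perm _ _ _).nodup_iff.mpr ((PySem.Dict.nodup_keys_counter A).filter _)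
  exact (List.Pairwise.and h1 hnd).imp (fun h => lt_of_le_of_ne h.1 h.2)

lemma gcount_one (A : List Int) : gcount A 1 = ((A.count 1 : Nat) : Int) := by
  simp [gcount]

lemma keys_singleton (A : List Int) (hsz : (PySem.Dict.counter A).size = 1) :
    ∃ k, (∀ x ∈ A, x = k) ∧ k ∈ A := by
  rw [size_eq_keys_length, PySem.Dict.keys_counter] at hsz
  obtain ⟨k, hk⟩ := List.length_eq_one_iff.mp hsz
  refine ⟨k, fun x hx => ?_, ?_⟩
  · have : x ∈ PySem.Set.ofList A := (PySem.Set.mem_ofList A x).mpr hx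
    rw [hk] at this; simpa using this
  · have : k ∈ PySem.Set.ofList A := by rw [hk]; simp
    exact (PySem.Set.mem_ofList A k).mp this

-- main equality on ¬D_
lemma main_eq (A : List Int) (hpre : A ≠ []) (hnd : ¬ D_solution A) :
    solution A = solution_alt A := by
  cases hmx : PySem.List.max? A (fun x => x) with
  | none => exact absurd ((PySem.List.max?_eq_none_iff A _).mp hmx) hpre
  | some amax =>
    have hamem : amax ∈ A := PySem.List.max?_mem hmx
    have hale : ∀ y ∈ A, y ≤ amax := PySem.List.max?_isMax hmx
    by_cases hsz : (PySem.Dict.counter A).size = 1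
    · -- constant list
      simp only [solution, solution_alt, hmx, hsz, if_pos]
      obtain ⟨k, hall, hkA⟩ := keys_singleton A hsz
      have hak : amax = k := hall _ hamem
      cases A with
      | nil => exact absurd rfl hpre
      | cons a as =>
        have hax : a = k := hall a List.mem_cons_self
        have hall' : ∀ b ∈ k :: as, k = b := by
          intro b hb
          rw [← hax] at hb
          exact (hall b hb).symm
        rw [PySem.List.pyGetD_zero_cons, PySem.Dict.getD_counter, hak, hax,
          List.count_eq_length.mpr hall']
        ring
    · simp only [solution, solution_alt, hmx]
      rw [if_neg hsz, if_neg hsz, stepA_eq, stepB_eq, caval, ← gcount_one]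
      by_cases hpos : 0 < amax
      · by_cases h2 : (2 : Int) ≤ amax
        · -- main DP case
          have hmA : (1 : Nat) ≤ amax.toNat := by omega
          have hcA : amax + 1 = ((amax.toNat : Nat) : Int) + 1 := by omega
          rw [hcA, loopA A amax.toNat hmA]
          simp only [show (2 : Nat) ≤ amax.toNat by omega, if_pos]
          -- B side
          have hmem := mem_posVals A
          have hpw := pairwise_posVals A
          cases hvs : PySem.List.sorted ((PySem.Dict.counter A).keys.filter (fun k => decide (0 < k))) (fun x => x) false with
          | nil =>
            exfalso
            have : amax ∈ ([] : List Int) := by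
              rw [← hvs]; exact (hmem amax).mpr ⟨hamem, by omega⟩
            simp at this
          | cons v0 rest =>
            rw [hvs] at hmem hpw
            have hv0pos : 0 < v0 := ((hmem v0).mp List.mem_cons_self).2
            have hge : ∀ x ∈ v0 :: rest, v0 ≤ x := by
              intro x hx
              rcases List.mem_cons.mp hx with h | h
              · omega
              · exact le_of_lt ((List.pairwise_cons.mp hpw).1 x h)
            have hstep0 : stepB A (0, 0, none) v0 = (gcount A v0, 0, some v0) := by
              simp [stepB]
            have hz0 : ∀ r : Nat, 0 < r → r ≤ v0.toNat - 1 → A.count ((r : Nat) : Int) = 0 := by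
              intro r h1 h2
              rw [List.count_eq_zero]
              intro hmemA
              have : ((r : Nat) : Int) ∈ v0 :: rest := (hmem _).mpr ⟨hmemA, by omega⟩
              have := hge _ this
              omega
            have hdpv0 : dp A v0.toNat = (0, gcount A v0) := by
              have hvt : v0.toNat = (v0.toNat - 1) + 1 := by omega
              have hcast : (((v0.toNat - 1) + 1 : Nat) : Int) = v0 := by omega
              rw [hvt, dp_succ, dp_zero_prefix A (v0.toNat - 1) hz0, hcast]
              simp [max_eq_right (gcount_nonneg A v0 (le_of_lt hv0pos))]
            have hlast : rest.getLastD v0 = amax := by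
              have := getLastD_max (v0 :: rest) v0 amax
                ((hmem amax).mpr ⟨hamem, by omega⟩)
                (fun y hy => hale _ ((hmem y).mp hy).1) hpw
              rwa [List.getLastD_cons] at this
            rw [List.foldl_cons, hstep0,
              loopB A rest v0 (gcount A v0) 0 hv0pos (List.pairwise_cons.mp hpw).2
                (List.pairwise_cons.mp hpw).1
                (by
                  intro r hr hnl _
                  rw [List.count_eq_zero]
                  intro hmemA
                  have : r ∈ v0 :: rest := (hmem r).mpr ⟨hmemA, by omega⟩
                  rcases List.mem_cons.mp this with h | h
                  · omega
                  · exact hnl h)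
                (by rw [hdpv0]; exact max_eq_left (gcount_nonneg A v0 (le_of_lt hv0pos)))
                (by rw [hdpv0]), hlast]
        · -- amax = 1 : D_ holds, contradiction
          exfalso
          have ha1 : amax = 1 := by omega
          apply hnd
          refine ⟨ha1 ▸ hamem, fun x hx => by have := hale x hx; omega, ?_⟩
          by_contra hno
          push Not at hno
          apply hsz
          rw [size_eq_keys_length, PySem.Dict.keys_counter]
          have hall1 : ∀ x ∈ PySem.Set.ofList A, x = 1 := by
            intro x hx
            exact hno x ((PySem.Set.mem_ofList A x).mp hx)
          rcases nodup_all_eq (PySem.Set.ofList A) (PySem.Set.nodup_ofList A) hall1 with h | h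
          · exfalso
            have : amax ∈ PySem.Set.ofList A := (PySem.Set.mem_ofList A amax).mpr hamem
            rw [h] at this; simp at this
          · rw [h]; rfl
      · -- no positive element: both sides are 0
        push Not at hpos
        have hr : PySem.List.pyRange 2 (amax + 1) 1 = [] :=
          PySem.List.pyRange_one_eq_nil (by omega)
        have hf : (PySem.Dict.counter A).keys.filter (fun k => decide (0 < k)) = [] := by
          rw [List.filter_eq_nil_iff]
          intro k hk
          have : k ∈ A := (PySem.Set.mem_ofList A k).mp (by rwa [PySem.Dict.keys_counter] at hk)
          have := hale _ this
          simp; omega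
        rw [hr, hf, (PySem.List.sorted_eq_nil_iff _ _ _).mpr rfl]
        simp

lemma main_tight (A : List Int) (hpre : A ≠ []) (hD : D_solution A) :
    solution A ≠ solution_alt A := by
  obtain ⟨h1, hle, x, hx, hxne⟩ := hD
  cases hmx : PySem.List.max? A (fun x => x) with
  | none => exact absurd ((PySem.List.max?_eq_none_iff A _).mp hmx) hpre
  | some amax =>
    have hamem : amax ∈ A := PySem.List.max?_mem hmx
    have hale : ∀ y ∈ A, y ≤ amax := PySem.List.max?_isMax hmx
    have ha1 : amax = 1 := le_antisymm (hle _ hamem) (hale _ h1)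
    have hsz : ¬ (PySem.Dict.counter A).size = 1 := by
      intro hsz
      obtain ⟨k, hall, _⟩ := keys_singleton A hsz
      have e1 := hall _ h1
      have e2 := hall _ hx
      omega
    have hfil : (PySem.Dict.counter A).keys.filter (fun k => decide (0 < k)) = [1] := by
      have hnd := (PySem.Dict.nodup_keys_counter A).filter (fun k => decide (0 < k))
      have hall1 : ∀ y ∈ (PySem.Dict.counter A).keys.filter (fun k => decide (0 < k)), y = 1 := by
        intro y hy
        obtain ⟨hyk, hyp⟩ := List.mem_filter.mp hy
        have hyA : y ∈ A := (PySem.Set.mem_ofList A y).mp (by rwa [PySem.Dict.keys_counter] at hyk)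
        have := hle _ hyA
        simp at hyp
        omega
      have h1mem : (1 : Int) ∈ (PySem.Dict.counter A).keys.filter (fun k => decide (0 < k)) :=
        List.mem_filter.mpr ⟨by rw [PySem.Dict.keys_counter]; exact (PySem.Set.mem_ofList A 1).mpr h1, by simp⟩
      rcases nodup_all_eq _ hnd hall1 with h | h
      · rw [h] at h1mem; simp at h1mem
      · exact h
    have hcnt : 0 < A.count (1 : Int) := List.count_pos_iff.mpr h1
    simp only [solution, solution_alt, hmx]
    rw [if_neg hsz, if_neg hsz, stepB_eq, ha1,
      show (1 : Int) + 1 = 2 by norm_num, PySem.List.pyRange_one_eq_nil (le_refl (2 : Int)),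
      hfil, PySem.List.sorted_eq_self_of_pairwise _ _ (by simp)]
    have hst : stepB A (0, 0, none) 1 = (gcount A 1, 0, some 1) := by simp [stepB]
    simp only [List.foldl_nil, List.foldl_cons, hst, gcount_one]
    have : (0 : Int) < max ((A.count (1 : Int) : Nat) : Int) 0 := by
      rw [max_eq_left (by positivity)]
      omega
    omega

-- ===== VERDICT (by name: the statement is the Claim_ definition above) =====
theorem solution_spec : Claim_unchanged_solution := by
  intro A _ hpre hnd
  exact main_eq A hpre hnd
theorem solution_changed : Claim_changed_solution := by unfold Claim_changed_solution; decide
theorem solution_tight : Claim_exact_solution := by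
  intro A _ hpre hD
  exact main_tight A hpre hD
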